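-- pv_equiv track=rewrite | github.com/KirillSabitov/kPyton | gh.py | podskazka
-- ===== SOURCE A (Python) =====
-- def podskazka(chislogames,chislocom):
--     if chislogames == chislocom:
--         return 'Вы угадали!'
--
--     podskazka = []
--     for i in range(len(chislogames)):
--         if chislogames[i] == chislocom[i]:
--             podskazka.append('Горячо')
--         elif chislogames[i] in chislocom:
--             podskazka.append('Тепло')
--
--     if len(podskazka)==0:
--         return 'Холодно'
--
--
--     podskazka.sort()
--     return ' '.join(podskazka)
-- ===== SOURCE B (Python) =====
-- def podskazka(chislogames, chislocom):
--     if chislogames == chislocom: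
--         return 'Вы угадали!'
--     comset = set(chislocom)
--     pairs = list(zip(chislogames, chislocom))
--     hot = sum(1 for a, b in pairs if a == b)
--     warm = sum(1 for a, b in pairs if a != b and a in comset)
--     if hot == 0 and warm == 0:
--         return 'Холодно'
--     return ' '.join(['Горячо'] * hot + ['Тепло'] * warm)
-- ===== Notes on version B (the rewrite author's own statement) =====
-- stated objective: alternative
-- what changed: B replaces A's index loop that appends labels to a list and then sorts it by a staged pipeline: a hash set of chislocom's characters built once (removing A's inner 'in chislocom' scan), two filtered sums over the zipped character pairs (hot and warm counts), and the sorted output reconstructed directly as replicated labels (correct since 'Горячо' < 'Тепло'), so no label list and no sort exist.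
import Mathlib
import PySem

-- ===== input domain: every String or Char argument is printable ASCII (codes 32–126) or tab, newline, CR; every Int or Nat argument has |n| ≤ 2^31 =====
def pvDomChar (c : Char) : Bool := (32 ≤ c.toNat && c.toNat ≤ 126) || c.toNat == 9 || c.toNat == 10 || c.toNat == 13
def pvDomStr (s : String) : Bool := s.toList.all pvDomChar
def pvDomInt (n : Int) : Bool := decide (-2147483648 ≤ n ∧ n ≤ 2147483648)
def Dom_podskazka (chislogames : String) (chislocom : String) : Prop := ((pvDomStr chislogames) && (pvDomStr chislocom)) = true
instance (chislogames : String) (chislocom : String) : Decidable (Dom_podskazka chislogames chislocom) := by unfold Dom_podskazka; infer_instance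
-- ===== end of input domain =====

-- B replaces A's index loop (append label to a list, then sort) by a staged pipeline:
-- a set of chislocom's characters built once, two filtered sums over the zipped pairs,
-- and the sorted output emitted directly as replicated labels ('Горячо' < 'Тепло').
-- Objective: alternative decomposition (no label list, no sort).

-- ===== PORT A =====
-- one loop step of A; `chislogames[i] in chislocom` for a 1-char string is exactly
-- membership of that char in chislocom's characters (substring of length 1)
def pvStepA (gs cs : List Char) (acc : List String) (i : Int) : List String :=
  if PySem.List.pyGetD gs i ' ' = PySem.List.pyGetD cs i ' ' then acc ++ ["Горячо"]
  else if cs.contains (PySem.List.pyGetD gs i ' ') then acc ++ ["Тепло"]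
  else acc

def podskazka (chislogames : String) (chislocom : String) : String :=
  if chislogames = chislocom then "Вы угадали!"
  else
    let l := (PySem.List.pyRange 0 (chislogames.toList.length : Int) 1).foldl
              (pvStepA chislogames.toList chislocom.toList) []
    if l.length = 0 then "Холодно"
    else PySem.Str.join " " (PySem.List.sorted l (fun x => x) false)

-- ===== PORT B =====
def podskazka_alt (chislogames : String) (chislocom : String) : String :=
  if chislogames = chislocom then "Вы угадали!"
  else
    let comset : PySem.Set Char := PySem.Set.ofList chislocom.toList
    let pairs := chislogames.toList.zip chislocom.toList
    let hot := ((pairs.filter (fun ab => ab.1 == ab.2)).map (fun _ => 1)).sum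
    let warm := ((pairs.filter (fun ab => ab.1 != ab.2 && comset.contains ab.1)).map (fun _ => 1)).sum
    if hot = 0 ∧ warm = 0 then "Холодно"
    else PySem.Str.join " " (List.replicate hot "Горячо" ++ List.replicate warm "Тепло")

-- ===== PRECONDITION & SPEC =====
-- Pre_ excludes exactly the inputs where A raises IndexError at chislocom[i]:
-- unequal strings with chislogames longer than chislocom.
def Pre_podskazka (chislogames : String) (chislocom : String) : Prop :=
  chislogames = chislocom ∨ chislogames.toList.length ≤ chislocom.toList.length
instance (chislogames : String) (chislocom : String) : Decidable (Pre_podskazka chislogames chislocom) := by unfold Pre_podskazka; infer_instance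
def pvWitness_podskazka : String × String := ("12", "13")

def Spec_podskazka (chislogames : String) (chislocom : String) (out : String) : Prop := out = podskazka_alt chislogames chislocom
instance (chislogames : String) (chislocom : String) (out : String) : Decidable (Spec_podskazka chislogames chislocom out) := by unfold Spec_podskazka; infer_instance

-- ===== CLAIM (what is proved, stated in full; the proofs are below) =====
def Claim_equal_podskazka : Prop := ∀ (chislogames : String) (chislocom : String), Dom_podskazka chislogames chislocom → Pre_podskazka chislogames chislocom → Spec_podskazka chislogames chislocom (podskazka chislogames chislocom)

-- ===== LEMMAS AND PROOFS =====

-- the labels A appends for one index, as a function of the two characters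
def pvLabel (cs : List Char) (a b : Char) : List String :=
  if a = b then ["Горячо"] else if cs.contains a then ["Тепло"] else []

theorem pvStepA_eq (gs cs : List Char) (acc : List String) (i : Int) :
    pvStepA gs cs acc i
      = acc ++ pvLabel cs (PySem.List.pyGetD gs i ' ') (PySem.List.pyGetD cs i ' ') := by
  unfold pvStepA pvLabel
  split_ifs <;> simp

-- A's loop over indices is the flatMap of pvLabel over the zipped characters
theorem pv_range_flatMap (gs cs : List Char) (h : gs.length ≤ cs.length)
    (f : Char → Char → List String) :
    (List.range gs.length).flatMap (fun i => f (gs.getD i ' ') (cs.getD i ' '))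
      = (gs.zip cs).flatMap (fun ab => f ab.1 ab.2) := by
  induction gs generalizing cs with
  | nil => simp
  | cons g gs ih =>
    cases cs with
    | nil => simp at h
    | cons c cs =>
      simp only [List.length_cons, List.range_succ_eq_map, List.flatMap_cons,
        List.flatMap_map, List.zip_cons_cons]
      simp only [List.getD_cons_zero, List.getD_cons_succ, Nat.succ_eq_add_one]
      exact congrArg _ (ih cs (by simpa using h))

-- counts of the two labels in the flatMap, and that nothing else occurs in it
theorem pv_count_label_G (cs : List Char) (a b : Char) :
    (pvLabel cs a b).count "Горячо" = if a == b then 1 else 0 := by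
  by_cases hab : a = b <;> by_cases hc : a ∈ cs <;>
    simp [pvLabel, hab, hc]

theorem pv_count_label_T (cs : List Char) (a b : Char) :
    (pvLabel cs a b).count "Тепло" = if a != b && cs.contains a then 1 else 0 := by
  by_cases hab : a = b <;> by_cases hc : a ∈ cs <;>
    simp [pvLabel, hab, hc]

theorem pv_mem_label (cs : List Char) (a b : Char) (x : String)
    (hx : x ∈ pvLabel cs a b) : x = "Горячо" ∨ x = "Тепло" := by
  unfold pvLabel at hx
  split_ifs at hx <;> simp_all

theorem pv_counts (cs : List Char) (pairs : List (Char × Char)) :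
    ((pairs.flatMap (fun ab => pvLabel cs ab.1 ab.2)).count "Горячо"
        = pairs.countP (fun ab => ab.1 == ab.2))
    ∧ ((pairs.flatMap (fun ab => pvLabel cs ab.1 ab.2)).count "Тепло"
        = pairs.countP (fun ab => ab.1 != ab.2 && cs.contains ab.1))
    ∧ ∀ x ∈ pairs.flatMap (fun ab => pvLabel cs ab.1 ab.2),
        x = "Горячо" ∨ x = "Тепло" := by
  induction pairs with
  | nil => simp
  | cons p pairs ih =>
    obtain ⟨h1, h2, h3⟩ := ih
    refine ⟨?_, ?_, ?_⟩
    · rw [List.flatMap_cons, List.count_append, pv_count_label_G,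
        List.countP_cons, h1, Nat.add_comm]
    · rw [List.flatMap_cons, List.count_append, pv_count_label_T,
        List.countP_cons, h2, Nat.add_comm]
    · intro x hx
      rw [List.flatMap_cons, List.mem_append] at hx
      rcases hx with hx | hx
      · exact pv_mem_label cs p.1 p.2 x hx
      · exact h3 x hx

theorem pv_perm (l : List String) (h : ∀ x ∈ l, x = "Горячо" ∨ x = "Тепло") :
    (List.replicate (l.count "Горячо") "Горячо" ++ List.replicate (l.count "Тепло") "Тепло").Perm l := by
  induction l with
  | nil => simp
  | cons x l ih =>
    have hx := h x (List.mem_cons_self)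
    have ih' := ih (fun y hy => h y (List.mem_cons_of_mem _ hy))
    rcases hx with hx | hx <;> subst hx
    · simpa [List.count_cons, List.replicate_succ] using ih'.cons "Горячо"
    · have hne : ¬(("Тепло" : String) = "Горячо") := by decide
      have hmid : (List.replicate (List.count "Горячо" l) "Горячо" ++
          "Тепло" :: List.replicate (List.count "Тепло" l) "Тепло").Perm
          ("Тепло" :: (List.replicate (List.count "Горячо" l) "Горячо" ++
            List.replicate (List.count "Тепло" l) "Тепло")) := List.perm_middle
      simpa [List.count_cons, hne, List.replicate_succ] using hmid.trans (ih'.cons "Тепло")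

-- membership in the built set is membership in chislocom's characters
theorem pv_set_contains (cs : List Char) (a : Char) :
    (PySem.Set.ofList cs).contains a = cs.contains a := by
  by_cases h : a ∈ cs <;> simp [h, PySem.Set.mem_ofList]

-- a filtered sum of ones is countP
theorem pv_sum_ones (p : Char × Char → Bool) (l : List (Char × Char)) :
    ((l.filter p).map (fun _ => 1)).sum = l.countP p := by
  simp [List.map_const', List.sum_replicate, List.countP_eq_length_filter]

-- ===== VERDICT (by name: the statement is the Claim_ definition above) =====
theorem podskazka_spec : Claim_equal_podskazka := by
  intro g c _ hpre
  unfold Spec_podskazka podskazka podskazka_alt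
  by_cases hgc : g = c
  · simp [hgc]
  · have hlen : g.toList.length ≤ c.toList.length := by
      rcases hpre with h | h
      · exact absurd h hgc
      · exact h
    simp only [if_neg hgc]
    -- A's list is the flatMap of pvLabel over the zipped characters
    have hfold : (PySem.List.pyRange 0 (g.toList.length : Int) 1).foldl
        (pvStepA g.toList c.toList) []
        = (g.toList.zip c.toList).flatMap (fun ab => pvLabel c.toList ab.1 ab.2) := by
      have hstep : (PySem.List.pyRange 0 (g.toList.length : Int) 1).foldl
          (pvStepA g.toList c.toList) []
          = (PySem.List.pyRange 0 (g.toList.length : Int) 1).foldl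
            (fun acc i => acc ++ pvLabel c.toList (PySem.List.pyGetD g.toList i ' ')
              (PySem.List.pyGetD c.toList i ' ')) [] := by
        apply PySem.List.foldl_congr_mem
        intro acc i _
        exact pvStepA_eq _ _ acc i
      rw [hstep, PySem.List.foldl_append_eq_flatMap, List.nil_append,
        PySem.List.pyRange_zero_natCast, List.flatMap_map]
      simp only [PySem.List.pyGetD_natCast]
      exact pv_range_flatMap g.toList c.toList hlen _
    rw [hfold]
    set pairs := g.toList.zip c.toList with hpairs
    set l := pairs.flatMap (fun ab => pvLabel c.toList ab.1 ab.2) with hl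
    obtain ⟨h1, h2, h3⟩ := pv_counts c.toList pairs
    rw [pv_sum_ones, pv_sum_ones]
    have hset : pairs.countP (fun ab => ab.1 != ab.2
          && (PySem.Set.ofList c.toList).contains ab.1)
        = pairs.countP (fun ab => ab.1 != ab.2 && c.toList.contains ab.1) := by
      apply List.countP_congr
      intro ab _
      rw [pv_set_contains]
    rw [hset, ← h1, ← h2, ← hl]
    by_cases hnil : l = []
    · simp [hnil]
    · have hpos : ¬ (l.count "Горячо" = 0 ∧ l.count "Тепло" = 0) := by
        obtain ⟨x, hx⟩ := List.exists_mem_of_ne_nil l hnil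
        rcases h3 x hx with rfl | rfl
        · have := List.count_pos_iff.mpr hx
          omega
        · have := List.count_pos_iff.mpr hx
          omega
      have hlenl : ¬ l.length = 0 := by simpa using hnil
      rw [if_neg hlenl, if_neg hpos]
      congr 1
      refine PySem.List.sorted_id_eq_of_perm_of_pairwise l _ ?_ ?_
      · exact pv_perm l h3
      · rw [List.pairwise_append]
        refine ⟨List.pairwise_replicate.mpr (Or.inr le_rfl),
          List.pairwise_replicate.mpr (Or.inr le_rfl), ?_⟩
        intro a ha b hb
        rw [List.eq_of_mem_replicate ha, List.eq_of_mem_replicate hb,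
          String.le_iff_toList_le]
        decide
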